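-- pv_equiv track=rewrite | github.com/Sharks820/jarvis-memory-repo | engine/src/jarvis_engine/voice.py | choose_voice
-- ===== SOURCE A (Python) =====
-- def _preferred_voice_patterns(profile: str) -> list[str]:
--     if profile == "jarvis_like":
--         return [
--             # British butler voices first -- refined, authoritative
--             "en-GB-RyanNeural",
--             "en-GB-ThomasNeural",
--             # Polished American male voices as fallback
--             "en-US-AndrewMultilingualNeural",
--             "en-US-BrianMultilingualNeural",
--             "en-US-AndrewNeural",
--             "en-US-GuyNeural",
--             "en-US-ChristopherNeural",
--             "en-US-RogerNeural",
--             # Windows SAPI fallbacks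
--             "Great Britain",
--             "David",
--             "en-GB",
--             "en-US",
--             "Male",
--         ]
--     return ["David", "en-US", "Male"]
--
-- def choose_voice(voices: list[str], profile: str, custom_pattern: str = "") -> str:
--     patterns = []
--     if custom_pattern.strip():
--         patterns.append(custom_pattern.strip())
--     patterns.extend(_preferred_voice_patterns(profile))
--
--     lowered = [(v, v.lower()) for v in voices]
--     for pattern in patterns:
--         p = pattern.lower()
--         for raw, low in lowered:
--             if p in low:
--                 return raw
--     return voices[0] if voices else ""
-- ===== SOURCE B (Python) =====
-- def _preferred_voice_patterns(profile: str) -> list[str]: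
--     if profile == "jarvis_like":
--         return [
--             "en-GB-RyanNeural",
--             "en-GB-ThomasNeural",
--             "en-US-AndrewMultilingualNeural",
--             "en-US-BrianMultilingualNeural",
--             "en-US-AndrewNeural",
--             "en-US-GuyNeural",
--             "en-US-ChristopherNeural",
--             "en-US-RogerNeural",
--             "Great Britain",
--             "David",
--             "en-GB",
--             "en-US",
--             "Male",
--         ]
--     return ["David", "en-US", "Male"]
--
-- def choose_voice(voices: list[str], profile: str, custom_pattern: str = "") -> str:
--     stripped = custom_pattern.strip()
--     pats = ([stripped] if stripped else []) + _preferred_voice_patterns(profile)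
--     pats_l = [p.lower() for p in pats]
--     n = len(pats_l)
--     best = voices[0] if voices else ""
--     best_rank = n
--     for v in voices:
--         low = v.lower()
--         rank = next((i for i, p in enumerate(pats_l) if p in low), n)
--         if rank < best_rank:
--             best, best_rank = v, rank
--     return best
-- ===== Notes on version B (the rewrite author's own statement) =====
-- stated objective: alternative
-- what changed: Inverted the loop nesting: instead of scanning patterns first and all voices inside, B makes one pass over the voices, computes each voice's rank (index of the first matching pattern), and keeps the argmin of (rank, position) with a strict-less-than update.
import Mathlib
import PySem

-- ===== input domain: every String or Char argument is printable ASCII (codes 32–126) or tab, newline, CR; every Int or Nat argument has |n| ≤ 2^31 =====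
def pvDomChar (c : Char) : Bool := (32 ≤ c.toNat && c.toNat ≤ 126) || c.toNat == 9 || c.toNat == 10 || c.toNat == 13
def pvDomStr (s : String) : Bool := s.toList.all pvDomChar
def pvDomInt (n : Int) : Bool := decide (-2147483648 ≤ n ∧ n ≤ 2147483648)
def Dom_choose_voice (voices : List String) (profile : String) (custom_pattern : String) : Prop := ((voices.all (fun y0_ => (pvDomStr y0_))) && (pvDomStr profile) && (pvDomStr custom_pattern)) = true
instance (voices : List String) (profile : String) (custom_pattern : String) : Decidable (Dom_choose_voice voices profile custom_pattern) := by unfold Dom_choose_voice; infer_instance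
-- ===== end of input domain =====

-- B replaces A's pattern-first nested scan by a single pass over the voices keeping the argmin of
-- (rank of first matching pattern, voice position); objective: alternative decomposition, same cost.

-- ===== PORT A =====
def pv_prefs (profile : String) : List String :=
  if profile = "jarvis_like" then
    ["en-GB-RyanNeural", "en-GB-ThomasNeural",
     "en-US-AndrewMultilingualNeural", "en-US-BrianMultilingualNeural",
     "en-US-AndrewNeural", "en-US-GuyNeural", "en-US-ChristopherNeural", "en-US-RogerNeural",
     "Great Britain", "David", "en-GB", "en-US", "Male"]
  else ["David", "en-US", "Male"]

def choose_voice (voices : List String) (profile : String) (custom_pattern : String) : String :=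
  let stripped := PySem.Str.strip custom_pattern
  let patterns := (if stripped ≠ "" then [stripped] else []) ++ pv_prefs profile
  let lowered := voices.map (fun v => (v, PySem.Str.lower v))
  match patterns.findSome? (fun pattern =>
      (lowered.find? (fun rl => PySem.Str.isIn (PySem.Str.lower pattern) rl.2)).map (fun rl => rl.1)) with
  | some raw => raw
  | none => (voices.head?).getD ""

-- ===== PORT B =====
def choose_voice_alt (voices : List String) (profile : String) (custom_pattern : String) : String :=
  let stripped := PySem.Str.strip custom_pattern
  let pats := (if stripped ≠ "" then [stripped] else []) ++ pv_prefs profile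
  let patsL := pats.map PySem.Str.lower
  let n := patsL.length
  let res := voices.foldl (fun (best : String × Nat) v =>
      let rank := patsL.findIdx (fun p => PySem.Str.isIn p (PySem.Str.lower v))
      if rank < best.2 then (v, rank) else best) ((voices.head?).getD "", n)
  res.1

-- ===== PRECONDITION & SPEC =====
def Spec_choose_voice (voices : List String) (profile : String) (custom_pattern : String) (out : String) : Prop := out = choose_voice_alt voices profile custom_pattern
instance (voices : List String) (profile : String) (custom_pattern : String) (out : String) : Decidable (Spec_choose_voice voices profile custom_pattern out) := by unfold Spec_choose_voice; infer_instance

-- ===== CLAIM (what is proved, stated in full; the proofs are below) =====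
def Claim_equal_choose_voice : Prop := ∀ (voices : List String) (profile : String) (custom_pattern : String), Dom_choose_voice voices profile custom_pattern → Spec_choose_voice voices profile custom_pattern (choose_voice voices profile custom_pattern)

-- ===== LEMMAS AND PROOFS =====

-- rank of a voice w.r.t. the lowered pattern list ps (List.findIdx returns ps.length when no pattern matches)
def pvRk (ps : List String) (v : String) : Nat :=
  ps.findIdx (fun p => PySem.Str.isIn p (PySem.Str.lower v))

-- running minimum of ranks over vs, seeded with r0
def pvMn (ps : List String) (vs : List String) (r0 : Nat) : Nat :=
  vs.foldr (fun v acc => min (pvRk ps v) acc) r0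

theorem pvMn_cons (ps : List String) (v : String) (vs : List String) (r0 : Nat) :
    pvMn ps (v :: vs) r0 = min (pvRk ps v) (pvMn ps vs r0) := rfl

theorem pvFind?_ext {α : Type} (p q : α → Bool) (l : List α)
    (h : ∀ a ∈ l, p a = q a) : l.find? p = l.find? q := by
  induction l with
  | nil => rfl
  | cons a l ih =>
    simp only [List.find?_cons, h a List.mem_cons_self]
    cases q a <;> simp [ih (fun b hb => h b (List.mem_cons_of_mem a hb))]

theorem pvMn_le_seed (ps vs : List String) (r0 : Nat) : pvMn ps vs r0 ≤ r0 := by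
  induction vs with
  | nil => simp [pvMn]
  | cons v vs ih => rw [pvMn_cons]; exact le_trans (min_le_right _ _) ih

theorem pvMn_le_of_mem (ps : List String) {vs : List String} {v : String} (hv : v ∈ vs)
    (r0 : Nat) : pvMn ps vs r0 ≤ pvRk ps v := by
  induction vs with
  | nil => cases hv
  | cons w vs ih =>
    rw [pvMn_cons]
    rcases List.mem_cons.mp hv with h | h
    · subst h; exact min_le_left _ _
    · exact le_trans (min_le_right _ _) (ih h)

theorem pvMn_seed_min (ps vs : List String) {a b : Nat} (hab : a ≤ b) :
    pvMn ps vs a = min a (pvMn ps vs b) := by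
  induction vs with
  | nil => simp [pvMn, Nat.min_eq_left hab]
  | cons v vs ih => rw [pvMn_cons, pvMn_cons, ih]; omega

theorem pvMn_shift (ps : List String) (p : String) (vs : List String) (r0 : Nat)
    (h : ∀ v ∈ vs, PySem.Chars.isIn p.toList (PySem.Chars.lower v.toList) = false) :
    pvMn (p :: ps) vs (r0 + 1) = pvMn ps vs r0 + 1 := by
  induction vs with
  | nil => simp [pvMn]
  | cons v vs ih =>
    have hrk : pvRk (p :: ps) v = pvRk ps v + 1 := by
      simp [pvRk, List.findIdx_cons, h v List.mem_cons_self]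
    rw [pvMn_cons, pvMn_cons, ih (fun w hw => h w (List.mem_cons_of_mem v hw)), hrk]
    omega

theorem pvMn_exists (ps : List String) (vs : List String) (r0 : Nat)
    (h : pvMn ps vs r0 < r0) : ∃ v ∈ vs, pvRk ps v = pvMn ps vs r0 := by
  induction vs with
  | nil => simp [pvMn] at h
  | cons v vs ih =>
    rw [pvMn_cons] at h ⊢
    by_cases hc : pvRk ps v ≤ pvMn ps vs r0
    · exact ⟨v, List.mem_cons_self, (Nat.min_eq_left hc).symm⟩
    · rw [not_le] at hc
      have hmin : min (pvRk ps v) (pvMn ps vs r0) = pvMn ps vs r0 :=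
        Nat.min_eq_right (le_of_lt hc)
      rw [hmin] at h ⊢
      obtain ⟨w, hw, hrk⟩ := ih h
      exact ⟨w, List.mem_cons_of_mem v hw, hrk⟩

-- characterization of A's pattern-first search: it returns the first voice of minimal rank
theorem pvA_char (ps vs : List String) :
    (ps.findSome? (fun p => vs.find? (fun v => PySem.Str.isIn p (PySem.Str.lower v)))).getD
        ((vs.head?).getD "")
    = (vs.find? (fun v => pvRk ps v == pvMn ps vs ps.length)).getD "" := by
  induction ps generalizing vs with
  | nil =>
    have hmn : pvMn [] vs 0 = 0 := Nat.le_zero.mp (pvMn_le_seed [] vs 0)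
    simp only [List.findSome?_nil, Option.getD_none, List.length_nil, hmn]
    have hfd : vs.find? (fun v => pvRk [] v == 0) = vs.head? := by
      cases vs with
      | nil => rfl
      | cons v vs => simp [pvRk]
    rw [hfd]
  | cons p ps ih =>
    rcases hfind : vs.find? (fun v => PySem.Str.isIn p (PySem.Str.lower v)) with _ | v0
    · -- no voice matches p : all ranks shift by one
      have hnone : ∀ v ∈ vs, PySem.Chars.isIn p.toList (PySem.Chars.lower v.toList) = false := by
        intro v hv
        simpa using List.find?_eq_none.mp hfind v hv
      have hshift := pvMn_shift ps p vs ps.length hnone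
      have hpred : ∀ v ∈ vs,
          (pvRk (p :: ps) v == pvMn (p :: ps) vs (p :: ps).length)
          = (pvRk ps v == pvMn ps vs ps.length) := by
        intro v hv
        have hrk : pvRk (p :: ps) v = pvRk ps v + 1 := by
          simp [pvRk, List.findIdx_cons, hnone v hv]
        simp only [List.length_cons, hshift, hrk]
        by_cases h : pvRk ps v = pvMn ps vs ps.length <;> simp [h]
      simp only [List.findSome?_cons, hfind]
      rw [pvFind?_ext _ _ vs hpred]
      exact ih vs
    · -- some voice matches p : the minimal rank is 0 and A returns the first matcher
      have hv0mem : v0 ∈ vs := List.mem_of_find?_eq_some hfind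
      have hv0m : PySem.Chars.isIn p.toList (PySem.Chars.lower v0.toList) = true := by
        simpa using List.find?_some hfind
      have hrk0 : pvRk (p :: ps) v0 = 0 := by simp [pvRk, List.findIdx_cons, hv0m]
      have hmn0 : pvMn (p :: ps) vs (p :: ps).length = 0 := by
        have h1 := pvMn_le_of_mem (p :: ps) hv0mem (p :: ps).length
        omega
      have hpred : ∀ v ∈ vs,
          (pvRk (p :: ps) v == pvMn (p :: ps) vs (p :: ps).length)
          = (fun v => PySem.Str.isIn p (PySem.Str.lower v)) v := by
        intro v _
        rw [hmn0]
        rcases hm : PySem.Chars.isIn p.toList (PySem.Chars.lower v.toList) with _ | _ <;>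
          simp [pvRk, List.findIdx_cons, hm]
      simp only [List.findSome?_cons, hfind]
      rw [pvFind?_ext _ _ vs hpred, hfind]
      rfl

-- characterization of B's fold: first voice whose rank beats the seed and equals the running minimum
theorem pvB_char (ps : List String) (vs : List String) (b0 : String) (r0 : Nat) :
    (vs.foldl (fun (best : String × Nat) v =>
        if pvRk ps v < best.2 then (v, pvRk ps v) else best) (b0, r0)).1
    = (vs.find? (fun v => decide (pvRk ps v < r0) && (pvRk ps v == pvMn ps vs r0))).getD b0 := by
  induction vs generalizing b0 r0 with
  | nil => simp
  | cons v vs ih =>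
    simp only [List.foldl_cons, List.find?_cons, pvMn_cons]
    by_cases hlt : pvRk ps v < r0
    · rw [if_pos hlt]
      have hseed : pvMn ps vs (pvRk ps v) = min (pvRk ps v) (pvMn ps vs r0) :=
        pvMn_seed_min ps vs (le_of_lt hlt)
      by_cases heq : pvRk ps v ≤ pvMn ps vs r0
      · -- the head already attains the overall minimum
        have hM : min (pvRk ps v) (pvMn ps vs r0) = pvRk ps v := Nat.min_eq_left heq
        have hpv : (decide (pvRk ps v < r0) && (pvRk ps v == min (pvRk ps v) (pvMn ps vs r0))) = true := by
          simp [hlt, hM]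
        rw [hpv, ih]
        have hnone : vs.find? (fun w => decide (pvRk ps w < pvRk ps v) && (pvRk ps w == pvMn ps vs (pvRk ps v))) = none := by
          apply List.find?_eq_none.mpr
          intro w _
          rw [hseed, hM]
          simp only [Bool.and_eq_true, decide_eq_true_eq, beq_iff_eq, not_and]
          omega
        simp [hnone]
      · -- some later voice is strictly better
        rw [not_le] at heq
        have hM : min (pvRk ps v) (pvMn ps vs r0) = pvMn ps vs r0 :=
          Nat.min_eq_right (le_of_lt heq)
        have hpv : (decide (pvRk ps v < r0) && (pvRk ps v == min (pvRk ps v) (pvMn ps vs r0))) = false := by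
          rw [hM]; simp; omega
        rw [hpv, ih]
        have hext : ∀ w ∈ vs,
            (decide (pvRk ps w < pvRk ps v) && (pvRk ps w == pvMn ps vs (pvRk ps v)))
            = (fun w => decide (pvRk ps w < r0) && (pvRk ps w == min (pvRk ps v) (pvMn ps vs r0))) w := by
          intro w _
          rw [hseed, hM]
          by_cases h : pvRk ps w = pvMn ps vs r0
          · simp [h]; omega
          · have hb : (pvRk ps w == pvMn ps vs r0) = false := by simp [h]
            simp [hb]
        rw [pvFind?_ext _ _ vs hext]
        have hlt2 : pvMn ps vs r0 < r0 := lt_trans heq hlt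
        obtain ⟨w, hw, hrkw⟩ := pvMn_exists ps vs r0 hlt2
        rcases hf : vs.find? (fun w => decide (pvRk ps w < r0) && (pvRk ps w == min (pvRk ps v) (pvMn ps vs r0))) with _ | x
        · exfalso
          have hcontra := List.find?_eq_none.mp hf w hw
          rw [hM] at hcontra
          simp [hrkw, hlt2] at hcontra
        · simp
    · rw [if_neg hlt]
      rw [not_lt] at hlt
      have hM : min (pvRk ps v) (pvMn ps vs r0) = pvMn ps vs r0 :=
        Nat.min_eq_right (le_trans (pvMn_le_seed ps vs r0) hlt)
      have hpv : (decide (pvRk ps v < r0) && (pvRk ps v == min (pvRk ps v) (pvMn ps vs r0))) = false := by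
        simp; omega
      rw [hpv, hM]
      exact ih b0 r0

-- the two characterizations coincide
theorem pv_main (ps vs : List String) :
    (ps.findSome? (fun p => vs.find? (fun v => PySem.Str.isIn p (PySem.Str.lower v)))).getD
        ((vs.head?).getD "")
    = (vs.foldl (fun (best : String × Nat) v =>
        if pvRk ps v < best.2 then (v, pvRk ps v) else best) ((vs.head?).getD "", ps.length)).1 := by
  rw [pvA_char, pvB_char]
  by_cases hM : pvMn ps vs ps.length < ps.length
  · have hext : ∀ v ∈ vs,
        (pvRk ps v == pvMn ps vs ps.length)
        = (fun v => decide (pvRk ps v < ps.length) && (pvRk ps v == pvMn ps vs ps.length)) v := by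
      intro v _
      by_cases h : pvRk ps v = pvMn ps vs ps.length
      · simp [h]; omega
      · simp [h]
    rw [pvFind?_ext _ _ vs hext]
    obtain ⟨w, hw, hrkw⟩ := pvMn_exists ps vs ps.length hM
    rcases hf : vs.find? (fun v => decide (pvRk ps v < ps.length) && (pvRk ps v == pvMn ps vs ps.length)) with _ | x
    · exfalso
      have hcontra := List.find?_eq_none.mp hf w hw
      simp [hrkw, hM] at hcontra
    · simp
  · have hMeq : pvMn ps vs ps.length = ps.length :=
      Nat.le_antisymm (pvMn_le_seed ps vs ps.length) (Nat.le_of_not_lt hM)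
    have hA : vs.find? (fun v => pvRk ps v == pvMn ps vs ps.length) = vs.head? := by
      cases vs with
      | nil => rfl
      | cons v vs =>
        have hv : pvRk ps v = ps.length := by
          have h1 := pvMn_le_of_mem ps (List.mem_cons_self (a := v) (l := vs)) ps.length
          have h2 : pvRk ps v ≤ ps.length := List.findIdx_le_length
          omega
        simp [hv, hMeq]
    have hB : vs.find? (fun v => decide (pvRk ps v < ps.length) && (pvRk ps v == pvMn ps vs ps.length)) = none := by
      apply List.find?_eq_none.mpr
      intro w _
      simp only [Bool.and_eq_true, decide_eq_true_eq, beq_iff_eq, not_and, hMeq]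
      omega
    rw [hA, hB]
    cases vs <;> simp

-- bridging the two ports (over an arbitrary pattern list) to the characterizations above
theorem pv_bridge (pats vs : List String) :
    (match pats.findSome? (fun pattern =>
        ((vs.map (fun v => (v, PySem.Str.lower v))).find?
            (fun rl => PySem.Str.isIn (PySem.Str.lower pattern) rl.2)).map (fun rl => rl.1)) with
     | some raw => raw
     | none => (vs.head?).getD "")
    = (vs.foldl (fun (best : String × Nat) v =>
        let rank := (pats.map PySem.Str.lower).findIdx (fun p => PySem.Str.isIn p (PySem.Str.lower v))
        if rank < best.2 then (v, rank) else best) ((vs.head?).getD "", (pats.map PySem.Str.lower).length)).1 := by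
  have hmatch : ∀ (o : Option String) (d : String),
      (match o with | some r => r | none => d) = o.getD d := by
    intro o d; cases o <;> rfl
  rw [hmatch]
  have h1 : ∀ pat : String,
      ((vs.map (fun v => (v, PySem.Str.lower v))).find?
          (fun rl => PySem.Str.isIn (PySem.Str.lower pat) rl.2)).map (fun rl => rl.1)
      = vs.find? (fun v => PySem.Str.isIn (PySem.Str.lower pat) (PySem.Str.lower v)) := by
    intro pat
    rw [List.find?_map, Option.map_map]
    simp [Function.comp_def]
  simp only [h1]
  have h2 : pats.findSome? (fun pat => vs.find? (fun v => PySem.Str.isIn (PySem.Str.lower pat) (PySem.Str.lower v)))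
      = (pats.map PySem.Str.lower).findSome? (fun p => vs.find? (fun v => PySem.Str.isIn p (PySem.Str.lower v))) := by
    rw [List.findSome?_map]
    rfl
  rw [h2]
  have hmain := pv_main (pats.map PySem.Str.lower) vs
  simpa [pvRk] using hmain

-- ===== VERDICT (by name: the statement is the Claim_ definition above) =====
theorem choose_voice_spec : Claim_equal_choose_voice := by
  intro voices profile custom_pattern _
  exact pv_bridge ((if PySem.Str.strip custom_pattern ≠ "" then [PySem.Str.strip custom_pattern] else []) ++ pv_prefs profile) voices
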